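-- pv_equiv track=rewrite | github.com/daniel-reich/ubiquitous-fiesta | MNePwAcuoKG9Cza8G_13.py | build_staircase
-- ===== SOURCE A (Python) =====
-- def build_staircase(height, block):
--   if height == 0:
--     return []
--   a = list()
--   b = list()
--   for x in range(height):
--     y = x
--     for y in range(x + 1):
--       a.append(block)
--     for z in range(height- y - 1):
--       a.append("_")
--     b.append(a)
--     a = []
--   return b
-- ===== SOURCE B (Python) =====
-- def build_staircase(height, block):
--   row = ["_"] * height
--   result = []
--   for x in range(height):
--     row[x] = block
--     result.append(list(row))
--   return result
-- ===== Notes on version B (the rewrite author's own statement) =====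
-- stated objective: alternative
-- what changed: B maintains one running row (initialized to all underscores) and mutates a single cell per step, appending a copy, instead of rebuilding every row from scratch with two nested append loops.
import Mathlib
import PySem

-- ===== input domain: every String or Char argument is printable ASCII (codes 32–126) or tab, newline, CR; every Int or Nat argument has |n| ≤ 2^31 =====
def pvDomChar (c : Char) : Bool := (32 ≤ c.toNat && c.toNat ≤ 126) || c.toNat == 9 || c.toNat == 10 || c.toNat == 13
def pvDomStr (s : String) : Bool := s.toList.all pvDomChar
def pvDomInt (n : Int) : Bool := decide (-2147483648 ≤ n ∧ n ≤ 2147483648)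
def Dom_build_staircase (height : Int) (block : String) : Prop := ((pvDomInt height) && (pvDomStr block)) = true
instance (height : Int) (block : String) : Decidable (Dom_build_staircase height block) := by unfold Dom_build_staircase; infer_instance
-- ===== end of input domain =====

-- B builds the staircase by mutating one running row (all-underscore start) and appending
-- a copy per step, instead of A's per-row nested append loops; same cost, different decomposition.

-- ===== PORT A =====
-- literal port of A: per row x, append block (x+1) times then "_" (height-y-1) times.
-- (Python's inner 'for y in range(x+1)' leaves y = x, since x ≥ 0 makes the range nonempty;
-- the port writes y := x accordingly.)
def build_staircase (height : Int) (block : String) : List (List String) :=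
  if height = 0 then []
  else
    (PySem.List.pyRange 0 height 1).foldl (fun (b : List (List String)) x =>
      let a : List String := []
      let a := (PySem.List.pyRange 0 (x + 1) 1).foldl (fun a _ => a ++ [block]) a
      let y := x
      let a := (PySem.List.pyRange 0 (height - y - 1) 1).foldl (fun a _ => a ++ ["_"]) a
      b ++ [a]) []

-- ===== PORT B =====
-- literal port of Source B: running row, row[x] = block each step, append a copy.
def build_staircase_alt (height : Int) (block : String) : List (List String) :=
  ((PySem.List.pyRange 0 height 1).foldl
      (fun (st : List String × List (List String)) x =>
        let row := st.1.set x.toNat block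
        (row, st.2 ++ [row]))
      (List.replicate height.toNat "_", [])).2

-- ===== PRECONDITION & SPEC =====
def Spec_build_staircase (height : Int) (block : String) (out : List (List String)) : Prop := out = build_staircase_alt height block
instance (height : Int) (block : String) (out : List (List String)) : Decidable (Spec_build_staircase height block out) := by unfold Spec_build_staircase; infer_instance

-- ===== CLAIM (what is proved, stated in full; the proofs are below) =====
def Claim_equal_build_staircase : Prop := ∀ (height : Int) (block : String), Dom_build_staircase height block → Spec_build_staircase height block (build_staircase height block)

-- ===== LEMMAS AND PROOFS =====

-- the x-th staircase row, Nat-indexed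
def pvRow (h : Nat) (block : String) (k : Nat) : List String :=
  List.replicate (k + 1) block ++ List.replicate (h - (k + 1)) "_"

theorem foldl_append_const {α β : Type} (c : α) (l : List β) (init : List α) :
    l.foldl (fun a _ => a ++ [c]) init = init ++ List.replicate l.length c := by
  induction l generalizing init with
  | nil => simp
  | cons x xs ih =>
      simp only [List.foldl_cons, ih, List.length_cons, List.replicate_succ]
      simp

theorem foldl_snoc_map {α β : Type} (f : β → α) (l : List β) (init : List α) :
    l.foldl (fun b x => b ++ [f x]) init = init ++ l.map f := by
  induction l generalizing init with
  | nil => simp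
  | cons x xs ih => simp [ih]

-- A's loop body produces pvRow (for 0 ≤ x < height)
theorem rowA_eq (height : Int) (block : String) (x : Int) (hx0 : 0 ≤ x) (hx : x < height) :
    ((PySem.List.pyRange 0 (height - x - 1) 1).foldl (fun a _ => a ++ ["_"])
      ((PySem.List.pyRange 0 (x + 1) 1).foldl (fun a _ => a ++ [block]) []))
    = pvRow height.toNat block x.toNat := by
  rw [foldl_append_const, foldl_append_const]
  simp only [List.nil_append, PySem.List.length_pyRange_one, pvRow]
  have h1 : (x + 1 - 0).toNat = x.toNat + 1 := by omega
  have h2 : (height - x - 1 - 0).toNat = height.toNat - (x.toNat + 1) := by omega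
  rw [h1, h2]

-- B's loop invariant: after processing range(0, n), the row is the n-th prefix row and
-- the accumulator is the first n staircase rows.
theorem B_inv (h : Nat) (block : String) (n : Nat) (hn : n ≤ h) :
    (PySem.List.pyRange 0 (n : Int) 1).foldl
      (fun (st : List String × List (List String)) x =>
        let row := st.1.set x.toNat block
        (row, st.2 ++ [row]))
      (List.replicate h "_", [])
    = (List.replicate n block ++ List.replicate (h - n) "_",
       (List.range n).map (pvRow h block)) := by
  induction n with
  | zero => simp [PySem.List.pyRange_one_eq_nil]
  | succ m ih =>
      have hm : m ≤ h := Nat.le_of_succ_le hn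
      have hsplit : PySem.List.pyRange 0 ((m + 1 : Nat) : Int) 1
          = PySem.List.pyRange 0 (m : Int) 1 ++ [(m : Int)] := by
        have := PySem.List.pyRange_one_succ_right (a := 0) (b := (m : Int)) (by positivity)
        simpa using this
      rw [hsplit, List.foldl_append, ih hm]
      simp only [List.foldl_cons, List.foldl_nil, Int.toNat_natCast]
      have hrest : h - m = (h - m - 1) + 1 := by omega
      have hset : (List.replicate m block ++ List.replicate (h - m) "_").set m block
          = List.replicate (m + 1) block ++ List.replicate (h - (m + 1)) "_" := by
        rw [hrest, List.replicate_succ, List.set_append_right _ _ (by simp),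
          List.length_replicate, Nat.sub_self, List.set_cons_zero]
        rw [List.replicate_succ' (n := m)]
        simp
        omega
      simp [hset, List.range_succ, pvRow]

theorem rowsA_eq (h : Nat) (block : String) :
    (PySem.List.pyRange 0 (h : Int) 1).map
      (fun x => ((PySem.List.pyRange 0 ((h : Int) - x - 1) 1).foldl (fun a _ => a ++ ["_"])
        ((PySem.List.pyRange 0 (x + 1) 1).foldl (fun a _ => a ++ [block]) [])))
    = (List.range h).map (pvRow h block) := by
  rw [PySem.List.pyRange_one]
  simp only [Int.sub_zero, Int.toNat_natCast, List.map_map]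
  apply List.map_congr_left
  intro k hk
  simp only [List.mem_range] at hk
  simp only [Function.comp_apply, zero_add]
  rw [rowA_eq (h : Int) block (k : Int) (by positivity) (by exact_mod_cast hk)]
  simp

-- ===== VERDICT (by name: the statement is the Claim_ definition above) =====
theorem build_staircase_spec : Claim_equal_build_staircase := by
  intro height block _
  unfold Spec_build_staircase build_staircase build_staircase_alt
  by_cases h0 : height = 0
  · simp [h0, PySem.List.pyRange_one_eq_nil]
  · rw [if_neg h0]
    by_cases hneg : height ≤ 0
    · rw [PySem.List.pyRange_one_eq_nil hneg]
      simp
    · have hneg' : 0 < height := by omega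
      have hh : height = (height.toNat : Int) := by omega
      rw [foldl_snoc_map (f := fun x =>
        ((PySem.List.pyRange 0 (height - x - 1) 1).foldl (fun a _ => a ++ ["_"])
          ((PySem.List.pyRange 0 (x + 1) 1).foldl (fun a _ => a ++ [block]) [])))]
      rw [hh]
      simp only [Int.toNat_natCast]
      rw [rowsA_eq height.toNat block, B_inv height.toNat block height.toNat le_rfl]
      simp
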